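-- pv_equiv track=rewrite | github.com/Prewal137/GlobalRiskInterConnectionEngine | pipeline/processing/inspect_sector_migration.py | detect_time_column
-- ===== SOURCE A (Python) =====
-- def detect_time_column(columns):
--     """
--     Detect time-related column from list of columns.
--
--     Priority:
--     1. 'year' (exact match, case-insensitive)
--     2. 'date' (exact match, case-insensitive)
--     3. Columns containing 'year' or 'date'
--
--     Args:
--         columns (list): List of column names
--
--     Returns:
--         str or None: Detected time column name
--     """
--     # Convert to lowercase for matching
--     cols_lower = [col.lower().strip() for col in columns]
--
--     # Exact matches (highest priority)
--     if 'year' in cols_lower: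
--         idx = cols_lower.index('year')
--         return columns[idx]
--     if 'date' in cols_lower:
--         idx = cols_lower.index('date')
--         return columns[idx]
--
--     # Partial matches
--     for i, col_lower in enumerate(cols_lower):
--         if 'year' in col_lower or 'date' in col_lower:
--             return columns[i]
--
--     return None
-- ===== SOURCE B (Python) =====
-- def detect_time_column(columns):
--     """Single pass over enumerate(columns), tracking first exact-'year',
--     exact-'date' and partial-match indices; pick by priority at the end."""
--     year_idx = None
--     date_idx = None
--     partial_idx = None
--     for i, col in enumerate(columns):
--         cl = col.lower().strip()
--         if year_idx is None and cl == 'year':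
--             year_idx = i
--         if date_idx is None and cl == 'date':
--             date_idx = i
--         if partial_idx is None and ('year' in cl or 'date' in cl):
--             partial_idx = i
--     if year_idx is not None:
--         return columns[year_idx]
--     if date_idx is not None:
--         return columns[date_idx]
--     if partial_idx is not None:
--         return columns[partial_idx]
--     return None
-- ===== Notes on version B (the rewrite author's own statement) =====
-- stated objective: alternative
-- what changed: Replaces A's three separate scans (two membership tests + .index lookups over a precomputed lowered list, then an enumerate loop) with one pass over enumerate(columns) that maintains the first exact-'year', exact-'date' and partial-match indices and picks by priority afterwards.
import Mathlib
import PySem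

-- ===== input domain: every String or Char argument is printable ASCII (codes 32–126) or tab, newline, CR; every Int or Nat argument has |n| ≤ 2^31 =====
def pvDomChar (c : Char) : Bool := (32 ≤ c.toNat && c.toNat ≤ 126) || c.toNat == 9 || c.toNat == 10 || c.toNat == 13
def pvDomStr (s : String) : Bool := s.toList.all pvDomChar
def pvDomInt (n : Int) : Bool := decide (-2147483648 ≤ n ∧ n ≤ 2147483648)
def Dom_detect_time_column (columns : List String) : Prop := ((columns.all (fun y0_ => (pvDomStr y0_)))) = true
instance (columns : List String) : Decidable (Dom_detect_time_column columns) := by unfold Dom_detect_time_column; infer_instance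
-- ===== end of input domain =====

-- B replaces A's multi-scan priority search (two membership+index scans of a lowered list,
-- then an enumerate loop) by a single pass tracking three candidate indices; alternative, not faster.

-- ===== PORT A =====
-- normalisation col.lower().strip() (shared by both ports)
def lowerStrip (c : String) : String := PySem.Str.strip (PySem.Str.lower c)

-- the 'for i, col_lower in enumerate(cols_lower): if … : return columns[i]' loop
def partialLoopA (columns : List String) : List (Int × String) → Option String
  | [] => none
  | (i, cl) :: rest =>
      if PySem.Str.isIn "year" cl || PySem.Str.isIn "date" cl then
        PySem.List.pyGet? columns i
      else partialLoopA columns rest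

def detect_time_column (columns : List String) : Option String :=
  let colsLower := columns.map lowerStrip
  -- "if 'year' in cols_lower: idx = cols_lower.index('year'); return columns[idx]"
  match PySem.List.index? colsLower "year" with
  | some idx => PySem.List.pyGet? columns (idx : Int)
  | none =>
    match PySem.List.index? colsLower "date" with
    | some idx => PySem.List.pyGet? columns (idx : Int)
    | none => partialLoopA columns (PySem.List.enumerate colsLower 0)

-- ===== PORT B =====
-- one loop body: update the three first-match candidates
def stepB (st : Option Int × Option Int × Option Int) (p : Int × String) :
    Option Int × Option Int × Option Int :=
  let cl := lowerStrip p.2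
  ( (if st.1.isNone && (cl == "year") then some p.1 else st.1),
    (if st.2.1.isNone && (cl == "date") then some p.1 else st.2.1),
    (if st.2.2.isNone && (PySem.Str.isIn "year" cl || PySem.Str.isIn "date" cl)
       then some p.1 else st.2.2) )

def detect_time_column_alt (columns : List String) : Option String :=
  let st := (PySem.List.enumerate columns 0).foldl stepB (none, none, none)
  match st.1 with
  | some i => PySem.List.pyGet? columns i
  | none =>
    match st.2.1 with
    | some i => PySem.List.pyGet? columns i
    | none =>
      match st.2.2 with
      | some i => PySem.List.pyGet? columns i
      | none => none

-- ===== PRECONDITION & SPEC =====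
def Spec_detect_time_column (columns : List String) (out : Option String) : Prop := out = detect_time_column_alt columns
instance (columns : List String) (out : Option String) : Decidable (Spec_detect_time_column columns out) := by unfold Spec_detect_time_column; infer_instance

-- ===== CLAIM (what is proved, stated in full; the proofs are below) =====
def Claim_equal_detect_time_column : Prop := ∀ (columns : List String), Dom_detect_time_column columns → Spec_detect_time_column columns (detect_time_column columns)

-- ===== LEMMAS AND PROOFS =====

def pPart (cl : String) : Bool := PySem.Str.isIn "year" cl || PySem.Str.isIn "date" cl

-- shift a Nat index option into Int indices starting at s
def off (o : Option Nat) (s : Int) : Option Int := o.map (fun k => (k : Int) + s)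

theorem off_none (s : Int) : off none s = none := rfl
theorem off_some (a : Nat) (s : Int) : off (some a) s = some ((a : Int) + s) := rfl

-- one cons step of the "first exact match" candidate
theorem firstExact_cons (x : String) (t : List String) (v : String) (s : Int) :
    (if (lowerStrip x == v) then some s else (none : Option Int)).or
      (off (PySem.List.index? (t.map lowerStrip) v) (s + 1))
    = off (PySem.List.index? ((x :: t).map lowerStrip) v) s := by
  by_cases h : lowerStrip x = v
  · rw [List.map_cons, h, PySem.List.index?_cons_self]
    simp [off_some]
  · rw [List.map_cons, PySem.List.index?_cons_of_ne _ h]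
    cases hi : PySem.List.index? (t.map lowerStrip) v <;>
      simp [off, h]
    omega

-- one cons step of the "first partial match" candidate
theorem firstPart_cons (x : String) (t : List String) (s : Int) :
    (if pPart (lowerStrip x) then some s else (none : Option Int)).or
      (off (List.findIdx? pPart (t.map lowerStrip)) (s + 1))
    = off (List.findIdx? pPart ((x :: t).map lowerStrip)) s := by
  rw [List.map_cons, List.findIdx?_cons]
  by_cases h : pPart (lowerStrip x) = true
  · simp [off, h]
  · cases hi : List.findIdx? pPart (t.map lowerStrip) <;>
      simp [off, h]
    omega

-- characterise B's fold: each component is "old candidate, else first match offset by s"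
theorem foldB_char (xs : List String) (s : Int) (st : Option Int × Option Int × Option Int) :
    (PySem.List.enumerate xs s).foldl stepB st =
      ( st.1.or (off (PySem.List.index? (xs.map lowerStrip) "year") s),
        st.2.1.or (off (PySem.List.index? (xs.map lowerStrip) "date") s),
        st.2.2.or (off (List.findIdx? pPart (xs.map lowerStrip)) s) ) := by
  induction xs generalizing s st with
  | nil => simp [PySem.List.enumerate, off]
  | cons x t ih =>
    obtain ⟨y, d, p⟩ := st
    have hene : PySem.List.enumerate (x :: t) s = (s, x) :: PySem.List.enumerate t (s+1) := rfl
    have hstep : stepB (y, d, p) (s, x) =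
        ((if y.isNone && (lowerStrip x == "year") then some s else y),
         (if d.isNone && (lowerStrip x == "date") then some s else d),
         (if p.isNone && pPart (lowerStrip x) then some s else p)) := rfl
    rw [hene, List.foldl_cons, hstep, ih (s+1)]
    refine Prod.ext ?_ (Prod.ext ?_ ?_) <;> dsimp only
    · rcases y with _ | a
      · rw [Option.isNone_none, Bool.true_and]
        rw [firstExact_cons x t "year" s, Option.none_or]
      · simp
    · rcases d with _ | a
      · rw [Option.isNone_none, Bool.true_and]
        rw [firstExact_cons x t "date" s, Option.none_or]
      · simp
    · rcases p with _ | a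
      · rw [Option.isNone_none, Bool.true_and]
        rw [firstPart_cons x t s, Option.none_or]
      · simp

-- characterise A's partial loop as a findIdx? over the lowered names
theorem partialLoopA_char (columns : List String) (cls : List String) (s : Int) :
    partialLoopA columns (PySem.List.enumerate cls s) =
      match off (List.findIdx? pPart cls) s with
      | some i => PySem.List.pyGet? columns i
      | none => none := by
  induction cls generalizing s with
  | nil => simp [PySem.List.enumerate, partialLoopA, off]
  | cons x t ih =>
    have hene : PySem.List.enumerate (x :: t) s = (s, x) :: PySem.List.enumerate t (s+1) := rfl
    rw [hene, List.findIdx?_cons]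
    by_cases h : pPart x = true
    · simp only [partialLoopA]
      have h' : (PySem.Str.isIn "year" x || PySem.Str.isIn "date" x) = true := h
      rw [h', if_pos rfl, if_pos h]
      simp [off_some]
    · simp only [partialLoopA]
      have h' : (PySem.Str.isIn "year" x || PySem.Str.isIn "date" x) = false := by
        simpa [pPart] using h
      rw [h']
      simp only [Bool.false_eq_true, if_false, ih (s+1), h]
      cases hi : List.findIdx? pPart t with
      | none => rfl
      | some a =>
        rw [Option.map_some, off_some, off_some]
        have : ((a : Int) + (s + 1)) = (((a + 1 : Nat) : Int) + s) := by push_cast; ring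
        rw [this]

theorem detect_time_column_spec : Claim_equal_detect_time_column := by
  intro columns _
  show detect_time_column columns = detect_time_column_alt columns
  unfold detect_time_column detect_time_column_alt
  rw [foldB_char]
  simp only [Option.none_or]
  cases hy : PySem.List.index? (columns.map lowerStrip) "year" with
  | some i =>
    rw [off_some]
    have : ((i : Int) + 0) = (i : Int) := by omega
    rw [this]
  | none =>
    rw [off_none]
    cases hd : PySem.List.index? (columns.map lowerStrip) "date" with
    | some i =>
      rw [off_some]
      have : ((i : Int) + 0) = (i : Int) := by omega
      rw [this]
    | none =>
      rw [off_none]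
      rw [partialLoopA_char columns (columns.map lowerStrip) 0]
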